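-- pv_equiv track=rewrite | github.com/pypi-data/pypi-mirror-403 | packages/tinybird/tinybird-3.1.0.dev0.tar.gz/tinybird-3.1.0.dev0/tinybird/datafile/common.py | clean_line_comments
-- ===== SOURCE A (Python) =====
-- def clean_line_comments(line: str) -> str:
--     if not line:
--         return line
--     i = 0
--     inside_json_path = False
--     while i < len(line):
--         if i + 1 < len(line) and line[i] == "-" and line[i + 1] == "-" and not inside_json_path:
--             return line[:i].strip()
--
--         if not inside_json_path and line[i:].startswith("`json:"):
--             inside_json_path = True
--         elif inside_json_path and line[i] == "`":
--             inside_json_path = False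
--         i += 1
--     return line
-- ===== SOURCE B (Python) =====
-- def clean_line_comments(line: str) -> str:
--     def cut(s: str):
--         # index (into s) of the first "--" not inside a `json:...` region, else None
--         p_dash = s.find("--")
--         if p_dash == -1:
--             return None
--         p_open = s.find("`json:")
--         if p_open == -1 or p_dash < p_open:
--             return p_dash
--         close = s.find("`", p_open + 1)
--         if close == -1:
--             return None
--         r = cut(s[close + 1:])
--         return None if r is None else close + 1 + r
--
--     k = cut(line)
--     return line if k is None else line[:k].strip()
-- ===== Notes on version B (the rewrite author's own statement) =====
-- stated objective: faster
-- what changed: A walks the line one character at a time, slicing the rest of the line at every index to test for the comment marker and the json-path opener while carrying an inside_json_path flag; B instead uses str.find to jump directly to the first comment marker and the first json-path opener, lets the earlier one win, and otherwise recurses on the suffix just past the region's closing backtick.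
import Mathlib
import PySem

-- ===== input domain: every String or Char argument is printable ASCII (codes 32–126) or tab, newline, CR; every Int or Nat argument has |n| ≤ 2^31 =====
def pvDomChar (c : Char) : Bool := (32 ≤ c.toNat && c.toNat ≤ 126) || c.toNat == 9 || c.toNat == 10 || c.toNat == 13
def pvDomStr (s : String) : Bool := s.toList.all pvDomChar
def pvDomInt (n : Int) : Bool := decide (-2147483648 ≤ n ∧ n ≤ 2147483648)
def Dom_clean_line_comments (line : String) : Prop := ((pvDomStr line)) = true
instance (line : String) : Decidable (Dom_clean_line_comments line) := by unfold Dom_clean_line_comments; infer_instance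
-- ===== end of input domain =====

-- B replaces A's char-by-char state machine (which slices the rest of the line at every index)
-- by a find-driven recursion over suffixes; same return value, measurably faster.

-- ===== PORT A =====
-- A's while-loop over index i with the inside_json_path flag; one step per character.
def aGo (l : List Char) (i : Nat) (inside : Bool) : List Char :=
  if _h : i < l.length then
    -- if i+1 < len(line) and line[i]=='-' and line[i+1]=='-' and not inside: return line[:i].strip()
    if i + 1 < l.length ∧ PySem.List.pyGet? l (i : Int) = some '-' ∧
        PySem.List.pyGet? l ((i : Int) + 1) = some '-' ∧ inside = false then
      PySem.Chars.strip (l.take i)          -- line[:i].strip() (i ≥ 0, so the slice is take i)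
    else
      -- the state update: enter on line[i:].startswith("`json:"), leave on a backtick
      let inside' :=
        if inside = false ∧ PySem.Chars.startswith (l.drop i) "`json:".toList then true
        else if inside = true ∧ PySem.List.pyGet? l (i : Int) = some '`' then false
        else inside
      aGo l (i + 1) inside'
  else l
termination_by l.length - i
decreasing_by omega

def clean_line_comments (line : String) : String :=
  if line = "" then line
  else String.ofList (aGo line.toList 0 false)

-- ===== PORT B =====
-- cut s = index of the first "--" in s not inside a `json:...` region (none if there is none):
-- find the first "--" and the first "`json:"; if the dashes come first they win, otherwise skip
-- to just past the region's closing backtick and recurse on that suffix.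
-- (fuel is only a totality guard: each recursive call is on a strictly shorter suffix, and the
-- wrapper goB supplies fuel s.length + 1, so the 0-fuel case is never reached.)
def goBF : Nat → List Char → Option Nat
  | 0, _ => none
  | fuel + 1, s =>
    let pd := PySem.Chars.find s "--".toList
    if pd = -1 then none
    else
      let po := PySem.Chars.find s "`json:".toList
      if po = -1 ∨ pd < po then some pd.toNat
      else
        let cl := PySem.Chars.findFrom s "`".toList (po + 1) none
        if cl = -1 then none
        else
          match goBF fuel (PySem.List.slice s (some (cl + 1)) none) with   -- s[close+1:]
          | none => none
          | some r => some (cl.toNat + 1 + r)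

def goB (s : List Char) : Option Nat := goBF (s.length + 1) s

def clean_line_comments_alt (line : String) : String :=
  match goB line.toList with
  | none => line
  | some k => String.ofList (PySem.Chars.strip (line.toList.take k))  -- line[:k].strip(), 0 ≤ k

-- ===== PRECONDITION & SPEC =====
def Spec_clean_line_comments (line : String) (out : String) : Prop := out = clean_line_comments_alt line
instance (line : String) (out : String) : Decidable (Spec_clean_line_comments line out) := by unfold Spec_clean_line_comments; infer_instance

-- ===== CLAIM (what is proved, stated in full; the proofs are below) =====
def Claim_equal_clean_line_comments : Prop := ∀ (line : String), Dom_clean_line_comments line → Spec_clean_line_comments line (clean_line_comments line)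

-- ===== LEMMAS AND PROOFS =====

-- find s sub points at the first k with sub <+: s.drop k

lemma find_eq_of_first (s sub : List Char) (k : Nat) (h1 : sub <+: s.drop k)
    (h2 : ∀ j < k, ¬ sub <+: s.drop j) : PySem.Chars.find s sub = k := by
  have hin : PySem.Chars.isIn sub s = true :=
    (PySem.Chars.exists_prefix_drop_iff_isIn sub s).1 ⟨k, h1⟩
  have h0 : 0 ≤ PySem.Chars.find s sub :=
    (PySem.Chars.find_nonneg_iff s sub).2 ((PySem.Chars.isIn_iff_infix sub s).1 hin)
  obtain ⟨hp, hmin⟩ := PySem.Chars.find_spec h0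
  rcases lt_trichotomy (PySem.Chars.find s sub).toNat k with h | h | h
  · exact absurd hp (h2 _ h)
  · omega
  · exact absurd h1 (hmin _ h)

lemma find_eq_zero_of_prefix (s sub : List Char) (h : sub <+: s) :
    PySem.Chars.find s sub = 0 := by
  exact find_eq_of_first s sub 0 (by simpa using h) (by omega)

lemma find_cons_shift (c : Char) (s' sub : List Char) (hnp : ¬ sub <+: (c :: s')) :
    PySem.Chars.find (c :: s') sub =
      if PySem.Chars.find s' sub = -1 then -1 else PySem.Chars.find s' sub + 1 := by
  by_cases hf : PySem.Chars.find s' sub = -1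
  · simp only [hf, if_pos]
    refine (PySem.Chars.find_eq_neg_one_iff (c::s') sub).2 ?_
    intro hinf
    rcases (List.infix_cons_iff).1 hinf with h | h
    · exact hnp h
    · exact (PySem.Chars.find_eq_neg_one_iff s' sub).1 hf h
  · have h0 : 0 ≤ PySem.Chars.find s' sub := by
      have := PySem.Chars.neg_one_le_find s' sub; omega
    obtain ⟨hp, hmin⟩ := PySem.Chars.find_spec h0
    rw [if_neg hf]
    have := find_eq_of_first (c :: s') sub ((PySem.Chars.find s' sub).toNat + 1)
      (by simpa using hp)
      (by
        intro j hj
        cases j with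
        | zero => simpa using hnp
        | succ j' => simpa using hmin j' (by omega))
    rw [this]; push_cast; omega

lemma lit_dd : ("--".toList : List Char) = ['-','-'] := rfl
lemma lit_json : ("`json:".toList : List Char) = ['`','j','s','o','n',':'] := rfl
lemma lit_bt : ("`".toList : List Char) = ['`'] := rfl

-- the recursive suffix s[cl+1:] is strictly shorter than s
lemma slice_len_lt (s : List Char) (cl : Int) (hs : 1 ≤ s.length) (hcl : 0 ≤ cl) :
    (PySem.List.slice s (some (cl + 1)) none).length < s.length := by
  rw [PySem.List.slice_from s (by omega)]
  have := List.length_drop (l := s) (i := (cl + 1).toNat)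
  omega

-- with fuel above the length of s, goBF does not depend on the exact fuel
lemma goBF_congr : ∀ (f1 f2 : Nat) (s : List Char), s.length < f1 → s.length < f2 →
    goBF f1 s = goBF f2 s := by
  intro f1
  induction f1 with
  | zero => intro f2 s h1 h2; omega
  | succ g1 IH =>
    intro f2 s h1 h2
    cases f2 with
    | zero => omega
    | succ g2 =>
      simp only [goBF]
      simp only [lit_dd, lit_json, lit_bt]
      by_cases hpd : PySem.Chars.find s ['-','-'] = -1
      · simp [hpd]
      · have hpd0 : 0 ≤ PySem.Chars.find s ['-','-'] := by
          have := PySem.Chars.neg_one_le_find s ['-','-']; omega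
        simp only [if_neg hpd]
        by_cases hpo : (PySem.Chars.find s ['`','j','s','o','n',':'] = -1 ∨
            PySem.Chars.find s ['-','-'] < PySem.Chars.find s ['`','j','s','o','n',':'])
        · simp only [if_pos hpo]
        · simp only [if_neg hpo]
          have hpo0 : 0 ≤ PySem.Chars.find s ['`','j','s','o','n',':'] := by
            have := PySem.Chars.neg_one_le_find s ['`','j','s','o','n',':']
            rcases not_or.1 hpo with ⟨h1', -⟩
            omega
          have hpolen : (PySem.Chars.find s ['`','j','s','o','n',':']).toNat + 1 ≤ s.length := by
            obtain ⟨hp, -⟩ := PySem.Chars.find_spec hpo0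
            have h6 := hp.length_le
            have := List.length_drop (l := s) (i := (PySem.Chars.find s ['`','j','s','o','n',':']).toNat)
            simp at h6
            omega
          have hre := PySem.Chars.findFrom_natCast s ['`']
              ((PySem.Chars.find s ['`','j','s','o','n',':']).toNat + 1) hpolen
          have hcast : (((PySem.Chars.find s ['`','j','s','o','n',':']).toNat + 1 : Nat) : Int) =
              PySem.Chars.find s ['`','j','s','o','n',':'] + 1 := by push_cast; omega
          rw [hcast] at hre
          by_cases hcl : PySem.Chars.findFrom s ['`']
              (PySem.Chars.find s ['`','j','s','o','n',':'] + 1) none = -1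
          · simp [hcl]
          · simp only [if_neg hcl]
            have hcl0 : 0 ≤ PySem.Chars.findFrom s ['`']
                (PySem.Chars.find s ['`','j','s','o','n',':'] + 1) none := by
              rw [hre] at hcl ⊢
              split at hcl
              · simp at hcl
              · rename_i hne
                have := PySem.Chars.neg_one_le_find
                  (s.drop ((PySem.Chars.find s ['`','j','s','o','n',':']).toNat + 1)) ['`']
                split
                · omega
                · push_cast; omega
            have hlt := slice_len_lt s
              (PySem.Chars.findFrom s ['`'] (PySem.Chars.find s ['`','j','s','o','n',':'] + 1) none)
              (by omega) hcl0
            rw [IH g2 _ (by omega) (by omega)]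

lemma goB_cons (c : Char) (s : List Char)
    (hd : ¬ "--".toList <+: (c :: s)) (hj : ¬ "`json:".toList <+: (c :: s)) :
    goB (c :: s) = (goB s).map (· + 1) := by
  have hlit1 : ("--".toList : List Char) = ['-','-'] := rfl
  have hlit2 : ("`json:".toList : List Char) = ['`','j','s','o','n',':'] := rfl
  rw [hlit1] at hd
  rw [hlit2] at hj
  simp only [goB, goBF]
  simp only [lit_dd, lit_json, lit_bt]
  simp only [find_cons_shift c s ['-','-'] hd, find_cons_shift c s ['`','j','s','o','n',':'] hj]
  by_cases hpd : PySem.Chars.find s ['-','-'] = -1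
  · simp [hpd]
  · have hpd0 : 0 ≤ PySem.Chars.find s ['-','-'] := by
      have := PySem.Chars.neg_one_le_find s ['-','-']; omega
    simp only [if_neg hpd]
    rw [if_neg (by omega)]
    by_cases hpo : PySem.Chars.find s ['`','j','s','o','n',':'] = -1
    · simp [hpo]
      omega
    · have hpo0 : 0 ≤ PySem.Chars.find s ['`','j','s','o','n',':'] := by
        have := PySem.Chars.neg_one_le_find s ['`','j','s','o','n',':']; omega
      simp only [if_neg hpo]
      by_cases hlt : PySem.Chars.find s ['-','-'] < PySem.Chars.find s ['`','j','s','o','n',':']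
      · rw [if_pos (Or.inr (by omega)), if_pos (Or.inr hlt)]
        simp
        omega
      · rw [if_neg (show ¬(PySem.Chars.find s ['`','j','s','o','n',':'] + 1 = -1 ∨ PySem.Chars.find s ['-','-'] + 1 < PySem.Chars.find s ['`','j','s','o','n',':'] + 1) from by
              push Not
              exact ⟨by omega, by omega⟩),
            if_neg (show ¬(PySem.Chars.find s ['`','j','s','o','n',':'] = -1 ∨ PySem.Chars.find s ['-','-'] < PySem.Chars.find s ['`','j','s','o','n',':']) from by
              push Not
              exact ⟨hpo, by omega⟩)]
        have hpolen : (PySem.Chars.find s ['`','j','s','o','n',':']).toNat + 1 ≤ s.length := by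
          obtain ⟨hp, -⟩ := PySem.Chars.find_spec hpo0
          have h6 := hp.length_le
          have := List.length_drop (l := s) (i := (PySem.Chars.find s ['`','j','s','o','n',':']).toNat)
          simp at h6
          omega
        rw [show PySem.Chars.find s ['`','j','s','o','n',':'] + 1 + 1 =
            (((PySem.Chars.find s ['`','j','s','o','n',':']).toNat + 2 : Nat) : Int) from by push_cast; omega]
        rw [show PySem.Chars.find s ['`','j','s','o','n',':'] + 1 =
            (((PySem.Chars.find s ['`','j','s','o','n',':']).toNat + 1 : Nat) : Int) from by push_cast; omega]
        have hclc := PySem.Chars.findFrom_natCast (c :: s) ['`']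
            ((PySem.Chars.find s ['`','j','s','o','n',':']).toNat + 2) (by simp; omega)
        have hcls := PySem.Chars.findFrom_natCast s ['`']
            ((PySem.Chars.find s ['`','j','s','o','n',':']).toNat + 1) hpolen
        have hdc : (c :: s).drop ((PySem.Chars.find s ['`','j','s','o','n',':']).toNat + 2) =
            s.drop ((PySem.Chars.find s ['`','j','s','o','n',':']).toNat + 1) :=
          List.drop_succ_cons ..
        rw [hdc] at hclc
        rw [hclc, hcls]
        by_cases hm : PySem.Chars.find
            (s.drop ((PySem.Chars.find s ['`','j','s','o','n',':']).toNat + 1)) ['`'] = -1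
        · simp only [if_pos hm]
          simp
        · have hm0 : 0 ≤ PySem.Chars.find
              (s.drop ((PySem.Chars.find s ['`','j','s','o','n',':']).toNat + 1)) ['`'] := by
            have := PySem.Chars.neg_one_le_find
              (s.drop ((PySem.Chars.find s ['`','j','s','o','n',':']).toNat + 1)) ['`']
            omega
          simp only [if_neg hm]
          rw [if_neg (show ¬(((((PySem.Chars.find s ['`','j','s','o','n',':']).toNat + 2 : Nat) : Int) + PySem.Chars.find (s.drop ((PySem.Chars.find s ['`','j','s','o','n',':']).toNat + 1)) ['`']) = -1) from by push_cast; omega),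
              if_neg (show ¬(((((PySem.Chars.find s ['`','j','s','o','n',':']).toNat + 1 : Nat) : Int) + PySem.Chars.find (s.drop ((PySem.Chars.find s ['`','j','s','o','n',':']).toNat + 1)) ['`']) = -1) from by push_cast; omega)]
          have hsl : PySem.List.slice (c :: s)
              (some ((((PySem.Chars.find s ['`','j','s','o','n',':']).toNat + 2 : Nat) : Int) +
                PySem.Chars.find (s.drop ((PySem.Chars.find s ['`','j','s','o','n',':']).toNat + 1)) ['`'] + 1)) none =
              PySem.List.slice s
              (some ((((PySem.Chars.find s ['`','j','s','o','n',':']).toNat + 1 : Nat) : Int) +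
                PySem.Chars.find (s.drop ((PySem.Chars.find s ['`','j','s','o','n',':']).toNat + 1)) ['`'] + 1)) none := by
            rw [PySem.List.slice_from _ (by push_cast; omega), PySem.List.slice_from _ (by push_cast; omega)]
            rw [show ((((PySem.Chars.find s ['`','j','s','o','n',':']).toNat + 2 : Nat) : Int) +
                PySem.Chars.find (s.drop ((PySem.Chars.find s ['`','j','s','o','n',':']).toNat + 1)) ['`'] + 1).toNat =
                ((((PySem.Chars.find s ['`','j','s','o','n',':']).toNat + 1 : Nat) : Int) +
                PySem.Chars.find (s.drop ((PySem.Chars.find s ['`','j','s','o','n',':']).toNat + 1)) ['`'] + 1).toNat + 1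
              from by push_cast; omega]
            exact List.drop_succ_cons ..
          rw [hsl]
          have hXlt : (PySem.List.slice s
              (some ((((PySem.Chars.find s ['`','j','s','o','n',':']).toNat + 1 : Nat) : Int) +
                PySem.Chars.find (s.drop ((PySem.Chars.find s ['`','j','s','o','n',':']).toNat + 1)) ['`'] + 1)) none).length < s.length :=
            slice_len_lt s _ (by omega) (by push_cast; omega)
          rw [goBF_congr ((c :: s).length) s.length (PySem.List.slice s
              (some ((((PySem.Chars.find s ['`','j','s','o','n',':']).toNat + 1 : Nat) : Int) +
                PySem.Chars.find (s.drop ((PySem.Chars.find s ['`','j','s','o','n',':']).toNat + 1)) ['`'] + 1)) none) (by simp only [List.length_cons]; omega) (by omega)]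
          cases goBF s.length (PySem.List.slice s
              (some ((((PySem.Chars.find s ['`','j','s','o','n',':']).toNat + 1 : Nat) : Int) +
                PySem.Chars.find (s.drop ((PySem.Chars.find s ['`','j','s','o','n',':']).toNat + 1)) ['`'] + 1)) none) with
          | none => simp
          | some r =>
            simp
            omega

lemma aGo_inside (n : Nat) : ∀ (l : List Char) (i : Nat), l.length - i ≤ n →
    aGo l i true =
      (if PySem.Chars.find (l.drop i) "`".toList = -1 then l
       else aGo l (i + (PySem.Chars.find (l.drop i) "`".toList).toNat + 1) false) := by
  induction n with
  | zero =>
    intro l i h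
    have hi : l.length ≤ i := by omega
    rw [aGo, dif_neg (by omega)]
    rw [List.drop_eq_nil_of_le hi, if_pos (by decide)]
  | succ n IH =>
    intro l i h
    by_cases hi : i < l.length
    · have hdropc : l.drop i = l[i] :: l.drop (i + 1) := List.drop_eq_getElem_cons hi
      rw [aGo, dif_pos hi]
      rw [if_neg (by simp)]
      simp only []
      have hpg : PySem.List.pyGet? l (i : Int) = some l[i] := by
        simp [List.getElem?_eq_getElem hi]
      by_cases hc : l[i] = '`'
      · rw [show (if true = false ∧ PySem.Chars.startswith (List.drop i l) "`json:".toList = true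
              then true else if True ∧ PySem.List.pyGet? l ↑i = some '`' then false else true)
            = false from by simp [hpg, hc]]
        have h0 : PySem.Chars.find (l.drop i) "`".toList = 0 := by
          apply find_eq_zero_of_prefix
          rw [hdropc]
          exact List.cons_prefix_cons.2 ⟨hc.symm, List.nil_prefix⟩
        rw [h0]
        norm_num
      · rw [show (if true = false ∧ PySem.Chars.startswith (List.drop i l) "`json:".toList = true
              then true else if True ∧ PySem.List.pyGet? l ↑i = some '`' then false else true)
            = true from by simp [hpg, hc]]
        rw [IH l (i + 1) (by omega)]
        have hshift : PySem.Chars.find (l.drop i) "`".toList =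
            if PySem.Chars.find (l.drop (i + 1)) "`".toList = -1 then -1
            else PySem.Chars.find (l.drop (i + 1)) "`".toList + 1 := by
          rw [hdropc]
          apply find_cons_shift
          intro hp
          exact hc ((List.cons_prefix_cons.1 hp).1.symm)
        rw [hshift]
        by_cases hm : PySem.Chars.find (l.drop (i + 1)) "`".toList = -1
        · rw [if_pos hm, if_pos (by rw [if_pos hm])]
        · have hm0 : 0 ≤ PySem.Chars.find (l.drop (i + 1)) "`".toList := by
            have := PySem.Chars.neg_one_le_find (l.drop (i + 1)) "`".toList; omega
          simp only [if_neg hm]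
          rw [if_neg (by omega)]
          congr 1
          omega
    · have hi' : l.length ≤ i := by omega
      rw [aGo, dif_neg (by omega)]
      rw [List.drop_eq_nil_of_le hi', if_pos (by decide)]

-- if sub does not occur in s it does not occur in any suffix of s
lemma find_drop_neg_one (s sub : List Char) (k : Nat) (h : PySem.Chars.find s sub = -1) :
    PySem.Chars.find (s.drop k) sub = -1 := by
  rw [PySem.Chars.find_eq_neg_one_iff] at h ⊢
  intro hin
  exact h (hin.trans (List.drop_suffix k s).isInfix)

lemma goB_none_of_no_dashes (s : List Char) (h : PySem.Chars.find s ['-','-'] = -1) :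
    goB s = none := by
  simp only [goB, goBF]
  simp only [lit_dd, lit_json, lit_bt]
  rw [if_pos h]

lemma goB_of_dashes (s : List Char) (h : ['-','-'] <+: s) : goB s = some 0 := by
  simp only [goB, goBF]
  simp only [lit_dd, lit_json, lit_bt]
  have hpd : PySem.Chars.find s ['-','-'] = 0 := find_eq_zero_of_prefix s _ h
  have hpo : ¬ PySem.Chars.find s ['`','j','s','o','n',':'] = 0 := by
    intro h0
    have h00 : 0 ≤ PySem.Chars.find s ['`','j','s','o','n',':'] := by omega
    obtain ⟨hp, -⟩ := PySem.Chars.find_spec h00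
    rw [h0] at hp
    simp at hp
    obtain ⟨t, ht⟩ := h
    obtain ⟨t', ht'⟩ := hp
    rw [← ht] at ht'
    simp at ht'
  have hlo := PySem.Chars.neg_one_le_find s ['`','j','s','o','n',':']
  rw [if_neg (by omega), hpd]
  rw [if_pos (by omega)]
  rfl

-- A's dash test at index i is exactly "['-','-'] is a prefix of l.drop i"
lemma dash_bridge (l : List Char) (i : Nat) (hi : i < l.length) :
    (i + 1 < l.length ∧ PySem.List.pyGet? l (i : Int) = some '-' ∧
      PySem.List.pyGet? l ((i : Int) + 1) = some '-' ∧ (false : Bool) = false)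
    ↔ ['-','-'] <+: l.drop i := by
  have hdropc := List.drop_eq_getElem_cons hi
  have hcast : ((i : Int) + 1) = ((i + 1 : Nat) : Int) := by push_cast; ring
  constructor
  · rintro ⟨h1, h2, h3, -⟩
    have hdropc2 := List.drop_eq_getElem_cons h1
    rw [hdropc, hdropc2]
    rw [PySem.List.pyGet?_natCast, List.getElem?_eq_getElem hi] at h2
    rw [hcast, PySem.List.pyGet?_natCast, List.getElem?_eq_getElem h1] at h3
    have h2' : l[i] = '-' := by injection h2
    have h3' : l[i + 1] = '-' := by injection h3
    exact List.cons_prefix_cons.2 ⟨h2'.symm, List.cons_prefix_cons.2 ⟨h3'.symm, List.nil_prefix⟩⟩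
  · intro hp
    rw [hdropc] at hp
    obtain ⟨hc1, hp1⟩ := List.cons_prefix_cons.1 hp
    have h1 : i + 1 < l.length := by
      by_contra hle
      rw [List.drop_eq_nil_of_le (by omega)] at hp1
      simp at hp1
    refine ⟨h1, ?_, ?_, rfl⟩
    · rw [PySem.List.pyGet?_natCast, List.getElem?_eq_getElem hi, ← hc1]
    · have hdropc2 := List.drop_eq_getElem_cons h1
      rw [hdropc2] at hp1
      obtain ⟨hc2, -⟩ := List.cons_prefix_cons.1 hp1
      rw [hcast, PySem.List.pyGet?_natCast, List.getElem?_eq_getElem h1, ← hc2]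

lemma aGo_outside (n : Nat) : ∀ (l : List Char) (i : Nat), l.length - i ≤ n →
    aGo l i false =
      (match goB (l.drop i) with
       | none => l
       | some r => PySem.Chars.strip (l.take (i + r))) := by
  induction n with
  | zero =>
    intro l i h
    rw [aGo, dif_neg (by omega)]
    rw [List.drop_eq_nil_of_le (by omega), goB_none_of_no_dashes [] (by decide)]
  | succ n IH =>
    intro l i h
    by_cases hi : i < l.length
    · have hdropc : l.drop i = l[i] :: l.drop (i + 1) := List.drop_eq_getElem_cons hi
      rw [aGo, dif_pos hi]
      by_cases hfire : ['-','-'] <+: l.drop i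
      · rw [if_pos ((dash_bridge l i hi).2 hfire)]
        rw [goB_of_dashes _ hfire]
        simp
      · rw [if_neg (fun hc => hfire ((dash_bridge l i hi).1 hc))]
        simp only []
        by_cases hjson : ("`json:".toList : List Char) <+: l.drop i
        · rw [if_pos (And.intro trivial ((PySem.Chars.startswith_iff (l.drop i) "`json:".toList).2 hjson))]
          rw [aGo_inside (n + 1) l (i + 1) (by omega)]
          have hlb : ("`".toList : List Char) = ['`'] := rfl
          simp only [hlb]
          have hjsonn : (['`','j','s','o','n',':'] : List Char) <+: l.drop i := hjson
          by_cases hpd : PySem.Chars.find (l.drop i) ['-','-'] = -1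
          · rw [goB_none_of_no_dashes _ hpd]
            by_cases hm : PySem.Chars.find (l.drop (i + 1)) ['`'] = -1
            · rw [if_pos hm]
            · rw [if_neg hm]
              have hm0 : 0 ≤ PySem.Chars.find (l.drop (i + 1)) ['`'] := by
                have := PySem.Chars.neg_one_le_find (l.drop (i + 1)) ['`']; omega
              rw [IH l (i + 1 + (PySem.Chars.find (l.drop (i + 1)) ['`']).toNat + 1) (by omega)]
              rw [goB_none_of_no_dashes _ ?hnd]
              case hnd =>
                have hdd : l.drop (i + 1 + (PySem.Chars.find (l.drop (i + 1)) ['`']).toNat + 1) =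
                    (l.drop i).drop ((PySem.Chars.find (l.drop (i + 1)) ['`']).toNat + 2) := by
                  rw [List.drop_drop]
                  congr 1
                  omega
                rw [hdd]
                exact find_drop_neg_one _ _ _ hpd
          · -- there are dashes, and the json-path region opens at index 0: skip past its close
            simp only [goB, goBF]
            simp only [lit_dd, lit_json, lit_bt]
            have hpo : PySem.Chars.find (l.drop i) ['`','j','s','o','n',':'] = 0 :=
              find_eq_zero_of_prefix _ _ hjsonn
            have hpd0 : 0 ≤ PySem.Chars.find (l.drop i) ['-','-'] := by
              have := PySem.Chars.neg_one_le_find (l.drop i) ['-','-']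
              omega
            simp only [hpo, if_neg hpd]
            rw [if_neg (show ¬((0:Int) = -1 ∨ PySem.Chars.find (l.drop i) ['-','-'] < 0) from by
              push Not
              exact ⟨by omega, by omega⟩)]
            have hlen1 : 1 ≤ (l.drop i).length := by
              have := hjsonn.length_le
              simp at this ⊢
              omega
            rw [show (0 : Int) + 1 = ((1 : Nat) : Int) from by norm_num]
            rw [PySem.Chars.findFrom_natCast (l.drop i) ['`'] 1 hlen1]
            have hdd : (l.drop i).drop 1 = l.drop (i + 1) := by
              rw [List.drop_drop]
            rw [hdd]
            by_cases hm : PySem.Chars.find (l.drop (i + 1)) ['`'] = -1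
            · rw [if_pos hm, if_pos hm]
              rw [if_pos rfl]
            · have hm0 : 0 ≤ PySem.Chars.find (l.drop (i + 1)) ['`'] := by
                have := PySem.Chars.neg_one_le_find (l.drop (i + 1)) ['`']
                omega
              rw [if_neg hm, if_neg hm]
              rw [if_neg (show ¬((((1 : Nat) : Int) + PySem.Chars.find (l.drop (i + 1)) ['`']) = -1) from by omega)]
              rw [IH l (i + 1 + (PySem.Chars.find (l.drop (i + 1)) ['`']).toNat + 1) (by omega)]
              have hsl : PySem.List.slice (l.drop i)
                  (some (((1 : Nat) : Int) + PySem.Chars.find (l.drop (i + 1)) ['`'] + 1)) none =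
                  l.drop (i + 1 + (PySem.Chars.find (l.drop (i + 1)) ['`']).toNat + 1) := by
                rw [PySem.List.slice_from _ (by omega), List.drop_drop]
                congr 1
                omega
              rw [hsl]
              rw [goBF_congr ((l.drop i).length) ((l.drop (i + 1 + (PySem.Chars.find (l.drop (i + 1)) ['`']).toNat + 1)).length + 1) (l.drop (i + 1 + (PySem.Chars.find (l.drop (i + 1)) ['`']).toNat + 1))
                (by simp; omega) (by omega)]
              rw [show goBF ((l.drop (i + 1 + (PySem.Chars.find (l.drop (i + 1)) ['`']).toNat + 1)).length + 1) (l.drop (i + 1 + (PySem.Chars.find (l.drop (i + 1)) ['`']).toNat + 1)) = goB (l.drop (i + 1 + (PySem.Chars.find (l.drop (i + 1)) ['`']).toNat + 1)) from rfl]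
              cases hgo : goB (l.drop (i + 1 + (PySem.Chars.find (l.drop (i + 1)) ['`']).toNat + 1)) with
              | none => rfl
              | some r =>
                simp only []
                congr 2
                omega
        · rw [if_neg (by
              rintro ⟨-, hc⟩
              exact hjson ((PySem.Chars.startswith_iff (l.drop i) "`json:".toList).1 hc))]
          rw [if_neg (by simp)]
          rw [IH l (i + 1) (by omega)]
          rw [hdropc, goB_cons l[i] (l.drop (i + 1))
            (by rw [← hdropc]; exact hfire) (by rw [← hdropc]; exact hjson)]
          cases goB (l.drop (i + 1)) with
          | none => rfl
          | some r =>
            simp only [Option.map_some]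
            congr 2
            omega
    · rw [aGo, dif_neg (by omega)]
      rw [List.drop_eq_nil_of_le (by omega), goB_none_of_no_dashes [] (by decide)]

-- ===== VERDICT (by name: the statement is the Claim_ definition above) =====
theorem clean_line_comments_spec : Claim_equal_clean_line_comments := by
  intro line _
  unfold Spec_clean_line_comments clean_line_comments clean_line_comments_alt
  by_cases h : line = ""
  · rw [if_pos h]
    have hl : line.toList = [] := by rw [h]; rfl
    rw [hl, goB_none_of_no_dashes [] (by decide)]
  · rw [if_neg h]
    rw [aGo_outside line.toList.length line.toList 0 (by omega)]
    simp only [List.drop_zero]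
    cases hgo : goB line.toList with
    | none => simp
    | some k => simp
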